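-- pv_equiv track=rewrite | github.com/GummyCap/SOP | kaprob/ex07_minesweeper/minesweeper.py | add_mines
-- ===== SOURCE A (Python) =====
-- import copy
--
-- def add_mines(minefield: list, mines: list) -> list:
--     """
--     Add mines to a minefield and return minefield.
--
--     This function cannot modify the original minefield list.
--     Minefield must be length long and width wide. Each non-mine position must contain single dot.
--     If a position is empty ("."), then a small mine is added ("x").
--     If a position contains small mine ("x"), a large mine is added ("X").
--     Mines are in a list.
--     Mine is a list. Each mine has 4 integer parameters in the format [N, S, E, W].
--         - N is the distance between area of mines and top of the minefield.
--         - S ... area of mines and bottom of the minefield.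
--         - E ... area of mines and right of the minefield.
--         - W ... area of mines and left of the minefield.
--
--     :param minefield: list
--     :param mines: list
--     :return: list
--     """
--     minefield_mines = copy.deepcopy(minefield)
--     for mine in mines:
--         minefield_mines = [['x' if (mine[3] <= w <= (len(minefield_mines[h]) - mine[2] - 1))
--                             and (mine[0] <= h <= len(minefield_mines) - mine[1] - 1)
--                             and minefield_mines[h][w] == '.'
--                             else 'X' if (mine[3] <= w <= (len(minefield_mines[h]) - mine[2] - 1))
--                             and (mine[0] <= h <= len(minefield_mines) - mine[1] - 1)
--                             and minefield_mines[h][w] == 'x'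
--                             else minefield_mines[h][w] for w in range(len(minefield_mines[0]))]
--                            for h in range(len(minefield_mines))]
--     return minefield_mines
--     pass
-- ===== SOURCE B (Python) =====
-- def add_mines(minefield: list, mines: list) -> list:
--     grid = [row[:] for row in minefield]
--     if not grid or not mines:
--         return grid
--     h_len = len(grid)
--     w_len = len(grid[0])
--     for n, s, e, w, *_ in mines:
--         for r in range(max(n, 0), min(h_len - s, h_len)):
--             row = grid[r]
--             for c in range(max(w, 0), min(w_len - e, w_len)):
--                 if row[c] == '.':
--                     row[c] = 'x'
--                 elif row[c] == 'x':
--                     row[c] = 'X'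
--     return grid
-- ===== Notes on version B (the rewrite author's own statement) =====
-- stated objective: faster
-- what changed: B copies the grid once and for each mine updates only the cells inside that mine's clamped rectangle in place, instead of rebuilding the whole grid per mine.
-- outside the precondition, e.g. on add_mines([[]], [[]]): A returns [[]], B raises ValueError
import Mathlib
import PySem

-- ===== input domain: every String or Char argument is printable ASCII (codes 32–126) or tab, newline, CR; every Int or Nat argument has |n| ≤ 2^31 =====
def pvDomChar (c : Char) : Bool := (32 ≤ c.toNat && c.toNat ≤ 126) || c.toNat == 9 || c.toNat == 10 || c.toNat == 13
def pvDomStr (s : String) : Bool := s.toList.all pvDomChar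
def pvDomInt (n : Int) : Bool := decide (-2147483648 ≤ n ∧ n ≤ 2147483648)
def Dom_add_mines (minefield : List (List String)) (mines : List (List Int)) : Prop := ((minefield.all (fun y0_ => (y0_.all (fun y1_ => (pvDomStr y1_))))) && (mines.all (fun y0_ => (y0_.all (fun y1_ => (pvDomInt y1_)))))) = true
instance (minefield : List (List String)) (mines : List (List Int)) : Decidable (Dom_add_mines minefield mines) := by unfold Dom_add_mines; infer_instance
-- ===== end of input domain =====

-- B copies the grid once and, for each mine, stamps only the cells inside that mine's clamped
-- rectangle, instead of rebuilding the whole grid once per mine (objective: a faster algorithm).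

-- ===== PORT A =====
-- one pass of A's per-mine list comprehension
def stepA (mf : List (List String)) (mine : List Int) : List (List String) :=
  (PySem.List.pyRange 0 (Int.ofNat mf.length)).map (fun h =>
    (PySem.List.pyRange 0 (Int.ofNat (PySem.List.pyGetD mf 0 ([] : List String)).length)).map (fun w =>
      let row := PySem.List.pyGetD mf h ([] : List String)
      let cell := PySem.List.pyGetD row w ""
      if (PySem.List.pyGetD mine 3 0 ≤ w ∧ w ≤ Int.ofNat row.length - PySem.List.pyGetD mine 2 0 - 1) ∧
         (PySem.List.pyGetD mine 0 0 ≤ h ∧ h ≤ Int.ofNat mf.length - PySem.List.pyGetD mine 1 0 - 1) ∧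
         cell = "." then "x"
      else if (PySem.List.pyGetD mine 3 0 ≤ w ∧ w ≤ Int.ofNat row.length - PySem.List.pyGetD mine 2 0 - 1) ∧
              (PySem.List.pyGetD mine 0 0 ≤ h ∧ h ≤ Int.ofNat mf.length - PySem.List.pyGetD mine 1 0 - 1) ∧
              cell = "x" then "X"
      else cell))

def add_mines (minefield : List (List String)) (mines : List (List Int)) : List (List String) :=
  mines.foldl stepA minefield

-- ===== PORT B =====
def stampCell (cell : String) : String :=
  if cell = "." then "x" else if cell = "x" then "X" else cell

-- the inner column loop of B, acting on one row
def stampRow (wlen e w : Int) (row : List String) : List String :=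
  (PySem.List.pyRange (max w 0) (min (wlen - e) wlen)).foldl
    (fun rw c => rw.modify c.toNat stampCell) row

-- one mine of B: stamp the clamped rectangle in place
def stepB (hlen wlen : Int) (grid : List (List String)) (mine : List Int) : List (List String) :=
  match mine with
  | n :: s :: e :: w :: _ =>
    (PySem.List.pyRange (max n 0) (min (hlen - s) hlen)).foldl
      (fun g r => g.modify r.toNat (stampRow wlen e w)) grid
  | _ => grid  -- unreachable inside Pre_ (B's Python raises ValueError here)

def add_mines_alt (minefield : List (List String)) (mines : List (List Int)) : List (List String) :=
  if minefield = [] ∨ mines = [] then minefield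
  else mines.foldl
    (stepB (Int.ofNat minefield.length) (Int.ofNat ((minefield.headD []).length))) minefield

-- ===== PRECONDITION & SPEC =====
-- Pre_ restricts to the function's stated domain (a rectangular minefield, mines with ≥ 4 numbers):
-- outside it A raises IndexError when a row is shorter than the first row or a mine has < 4 entries,
-- and on rows longer than the first row A silently truncates them to the first row's width.
def Pre_add_mines (minefield : List (List String)) (mines : List (List Int)) : Prop :=
  minefield = [] ∨ mines = [] ∨
  ((∀ row ∈ minefield, row.length = (minefield.headD []).length) ∧ ∀ m ∈ mines, 4 ≤ m.length)
instance (minefield : List (List String)) (mines : List (List Int)) : Decidable (Pre_add_mines minefield mines) := by unfold Pre_add_mines; infer_instance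

def pvWitness_add_mines : List (List String) × List (List Int) :=
  ([[".", "x", "q"], [".", ".", "."]], [[0, 0, 1, 1], [1, 0, 0, 0]])

def Spec_add_mines (minefield : List (List String)) (mines : List (List Int)) (out : List (List String)) : Prop := out = add_mines_alt minefield mines
instance (minefield : List (List String)) (mines : List (List Int)) (out : List (List String)) : Decidable (Spec_add_mines minefield mines out) := by unfold Spec_add_mines; infer_instance

-- ===== CLAIM (what is proved, stated in full; the proofs are below) =====
def Claim_equal_add_mines : Prop := ∀ (minefield : List (List String)) (mines : List (List Int)), Dom_add_mines minefield mines → Pre_add_mines minefield mines → Spec_add_mines minefield mines (add_mines minefield mines)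

-- ===== LEMMAS AND PROOFS =====

-- A on the empty grid stays empty
lemma stepA_nil (mine : List Int) : stepA [] mine = [] := by
  simp [stepA]

lemma add_mines_nil (mines : List (List Int)) : add_mines [] mines = [] := by
  unfold add_mines
  induction mines with
  | nil => rfl
  | cons m ms ih => simpa [List.foldl, stepA_nil] using ih

-- fold of modify over a half-open integer range, read pointwise
lemma getElem?_foldl_modify {α : Type} (f : α → α) (lo hi : Int) (h0 : 0 ≤ lo)
    (l : List α) (i : Nat) :
    ((PySem.List.pyRange lo hi).foldl (fun l r => l.modify r.toNat f) l)[i]? =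
      if lo ≤ (i : Int) ∧ (i : Int) < hi then l[i]?.map f else l[i]? := by
  induction hn : (hi - lo).toNat generalizing lo l with
  | zero =>
    rw [show PySem.List.pyRange lo hi = [] from by simp [PySem.List.pyRange]; omega]
    simp only [List.foldl]
    rw [if_neg (by omega)]
  | succ k ih =>
    rw [PySem.List.pyRange_one_cons (by omega)]
    simp only [List.foldl]
    rw [ih (lo + 1) (by omega) (l.modify lo.toNat f) (by omega)]
    rw [List.getElem?_modify]
    by_cases hi1 : lo.toNat = i
    · have : lo = (i : Int) := by omega
      subst this
      by_cases h2 : (i : Int) + 1 ≤ (i : Int) ∧ (i : Int) < hi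
      · omega
      · rw [if_neg h2, if_pos (by omega)]
        cases l[i]? <;> simp
    · have hne : lo ≠ (i : Int) := by omega
      by_cases h2 : lo + 1 ≤ (i : Int) ∧ (i : Int) < hi
      · rw [if_pos h2, if_pos (by omega)]
        cases l[i]? <;> simp [hi1]
      · rw [if_neg h2, if_neg (by omega)]
        cases l[i]? <;> simp [hi1]

-- a stamped row, read pointwise
lemma stampRow_getElem? (W : Nat) (e w : Int) (row : List String) (c : Nat) :
    (stampRow ((W : Nat) : Int) e w row)[c]? =
      if w ≤ (c : Int) ∧ (c : Int) < (W : Int) - e ∧ c < W then row[c]?.map stampCell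
      else row[c]? := by
  unfold stampRow
  rw [getElem?_foldl_modify _ _ _ (le_max_right w 0) row c]
  have h3 := min_choice ((W : Int) - e) (W : Int)
  have h4 := max_choice w (0 : Int)
  split_ifs with h1 h2 h2 <;> first | rfl | (exfalso; omega)

-- the per-mine step of A equals the per-mine step of B on a rectangular grid
lemma step_eq (H W : Nat) (g : List (List String)) (mine : List Int)
    (hg : g.length = H) (hW : ∀ row ∈ g, row.length = W) (hm : 4 ≤ mine.length)
    (hhead : (g.headD []).length = W) :
    stepA g mine = stepB (Int.ofNat H) (Int.ofNat W) g mine := by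
  obtain ⟨n, s, e, w, rest, rfl⟩ :
      ∃ n s e w rest, mine = n :: s :: e :: w :: rest := by
    match mine, hm with
    | n :: s :: e :: w :: rest, _ => exact ⟨n, s, e, w, rest, rfl⟩
  have hhead' : (g.getD 0 ([] : List String)).length = W := by
    cases g with
    | nil => simpa using hhead
    | cons a t => simpa using hhead
  apply List.ext_getElem?
  intro h
  rw [show stepB (Int.ofNat H) (Int.ofNat W) g (n :: s :: e :: w :: rest) =
      (PySem.List.pyRange (max n 0) (min ((H : Int) - s) (H : Int))).foldl
        (fun g r => g.modify r.toNat (stampRow (Int.ofNat W) e w)) g from rfl]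
  rw [getElem?_foldl_modify _ _ _ (le_max_right n 0) g h]
  simp only [stepA, hhead', hg, Int.ofNat_eq_natCast, PySem.List.pyRange_zero_natCast,
    List.map_map, List.getElem?_map, PySem.List.pyGetD_ofNat', List.getD_cons_succ,
    List.getD_cons_zero, max_le_iff, lt_min_iff]
  by_cases hh : h < H
  · rw [List.getElem?_range hh]
    have hgh : g[h]? = some (g[h]'(by omega)) := List.getElem?_eq_getElem (by omega)
    rw [hgh]
    have hrowmem : g[h]'(by omega) ∈ g := List.getElem_mem _
    have hrowlen : (g[h]'(by omega)).length = W := hW _ hrowmem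
    have hgetd : PySem.List.pyGetD g ((h : Nat) : Int) ([] : List String) = g[h]'(by omega) := by
      rw [PySem.List.pyGetD_natCast]
      exact List.getD_eq_getElem _ _ (by omega)
    by_cases hc : (n ≤ (h : Int) ∧ 0 ≤ (h : Int)) ∧ ((h : Int) < (H : Int) - s ∧ (h : Int) < (H : Int))
    · rw [if_pos hc]
      simp only [Option.map_some, Option.some.injEq, Function.comp]
      apply List.ext_getElem?
      intro c
      rw [stampRow_getElem?]
      by_cases hcw : c < W
      · rw [List.getElem?_map, List.getElem?_range hcw]
        have hcell : (g[h]'(by omega))[c]? = some ((g[h]'(by omega))[c]'(by omega)) :=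
          List.getElem?_eq_getElem (by omega)
        rw [hcell]
        simp only [Option.map_some, Function.comp_apply]
        rw [hgetd]
        have hcellv : PySem.List.pyGetD (g[h]'(by omega)) ((c : Nat) : Int) "" =
            (g[h]'(by omega))[c]'(by omega) := by
          rw [PySem.List.pyGetD_natCast]
          exact List.getD_eq_getElem _ _ (by omega)
        rw [hcellv]
        have hL : (g[h]'(by omega)).length = W := hrowlen
        simp only [stampCell]
        split_ifs <;> first | rfl | omega | (exfalso; simp_all)
      · rw [List.getElem?_map,
          List.getElem?_eq_none (by simpa using (by omega : W ≤ c))]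
        rw [if_neg (by rintro ⟨-, -, p⟩; omega), List.getElem?_eq_none (by omega)]
        rfl
    · rw [if_neg hc]
      simp only [Option.map_some, Option.some.injEq, Function.comp_apply]
      apply List.ext_getElem?
      intro c
      by_cases hcw : c < W
      · rw [List.getElem?_map, List.getElem?_range hcw]
        simp only [Option.map_some, Function.comp_apply, hgetd]
        have hcellv : PySem.List.pyGetD (g[h]'(by omega)) ((c : Nat) : Int) "" =
            (g[h]'(by omega))[c]'(by omega) := by
          rw [PySem.List.pyGetD_natCast]
          exact List.getD_eq_getElem _ _ (by omega)
        rw [hcellv]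
        rw [if_neg (by rintro ⟨-, p, -⟩; omega), if_neg (by rintro ⟨-, p, -⟩; omega)]
        exact (List.getElem?_eq_getElem (by omega)).symm
      · rw [List.getElem?_map,
          List.getElem?_eq_none (by simpa using (by omega : W ≤ c))]
        exact (List.getElem?_eq_none (by omega)).symm
  · rw [List.getElem?_eq_none (by simpa using (by omega : H ≤ h)),
      List.getElem?_eq_none (by omega)]
    split_ifs <;> rfl

-- the per-mine step of A preserves the grid's shape
lemma step_shape (H W : Nat) (g : List (List String)) (mine : List Int)
    (hg : g.length = H) (hhead : (g.headD []).length = W) (hH : H ≠ 0) :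
    (stepA g mine).length = H ∧ (∀ row ∈ stepA g mine, row.length = W) ∧
      ((stepA g mine).headD []).length = W := by
  have hhead' : (g.getD 0 ([] : List String)).length = W := by
    cases g with
    | nil => simpa using hhead
    | cons a t => simpa using hhead
  simp only [stepA, Int.ofNat_eq_natCast, PySem.List.pyRange_zero_natCast, List.map_map,
    PySem.List.pyGetD_ofNat', hhead', hg]
  refine ⟨by simp, ?_, ?_⟩
  · intro row hrow
    obtain ⟨k, hk, rfl⟩ := List.mem_map.mp hrow
    simp
  · obtain ⟨m, rfl⟩ : ∃ m, H = m + 1 := ⟨H - 1, by omega⟩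
    rw [List.range_succ_eq_map]
    simp

-- the folds over the mine list agree, carrying the shape invariant
lemma fold_eq (H W : Nat) (hH : H ≠ 0) (mines : List (List Int)) :
    ∀ g, g.length = H → (∀ row ∈ g, row.length = W) → (g.headD []).length = W →
      (∀ m ∈ mines, 4 ≤ m.length) →
      mines.foldl stepA g = mines.foldl (stepB (Int.ofNat H) (Int.ofNat W)) g := by
  induction mines with
  | nil => intro g _ _ _ _; rfl
  | cons m ms ih =>
    intro g hg hW hhead hm
    simp only [List.foldl]
    rw [← step_eq H W g m hg hW (hm m (List.mem_cons_self)) hhead]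
    obtain ⟨l1, l2, l3⟩ := step_shape H W g m hg hhead hH
    exact ih (stepA g m) l1 l2 l3 (fun x hx => hm x (List.mem_cons_of_mem _ hx))

-- ===== VERDICT (by name: the statement is the Claim_ definition above) =====
theorem add_mines_spec : Claim_equal_add_mines := by
  intro minefield mines _ hpre
  unfold Spec_add_mines add_mines_alt
  by_cases hmf : minefield = []
  · rw [if_pos (Or.inl hmf)]
    subst hmf
    exact add_mines_nil mines
  · by_cases hms : mines = []
    · rw [if_pos (Or.inr hms)]
      subst hms
      rfl
    · rw [if_neg (by tauto)]
      rcases hpre with h1 | h2 | ⟨hrect, hmines⟩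
      · exact absurd h1 hmf
      · exact absurd h2 hms
      · exact fold_eq minefield.length (minefield.headD []).length
          (by simpa using hmf) mines minefield rfl hrect rfl hmines
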